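-- pv_equiv track=rewrite | github.com/vfaroni/Colosseum | modules/lihtc_analyst/priorcode/federal_lihtc_processor.py | classify_federal_content_type
-- ===== SOURCE A (Python) =====
-- def classify_federal_content_type(text: str, source_type: str) -> str:
--     """Classify the type of federal content"""
--     text_lower = text.lower()
--
--     # Source-specific classification
--     if source_type == 'IRC':
--         if any(term in text_lower for term in ['definition', 'means', 'includes']):
--             return 'definition'
--         elif 'shall' in text_lower or 'must' in text_lower:
--             return 'requirement'
--         else:
--             return 'statute'
--
--     elif source_type == 'CFR':
--         if 'example' in text_lower:
--             return 'example'
--         elif 'table' in text_lower or 'schedule' in text_lower: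
--             return 'table'
--         else:
--             return 'regulation'
--
--     elif source_type in ['Rev_Proc', 'Rev_Rul']:
--         if 'background' in text_lower:
--             return 'background'
--         elif 'holding' in text_lower or 'conclusion' in text_lower:
--             return 'holding'
--         else:
--             return 'guidance'
--
--     else:
--         return 'federal_document'
-- ===== SOURCE B (Python) =====
-- # Argmin-over-hits rewrite: eagerly find ALL trigger terms present, then return the
-- # category of the best (lowest) rank found, instead of A's ordered short-circuit branch tree.
--
-- # per source: term -> rank (0 = strongest category, 1 = middle, absent terms -> default rank 2)
-- TERMS = {
--     'IRC':      {'definition': 0, 'means': 0, 'includes': 0, 'shall': 1, 'must': 1},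
--     'CFR':      {'example': 0, 'table': 1, 'schedule': 1},
--     'Rev_Proc': {'background': 0, 'holding': 1, 'conclusion': 1},
--     'Rev_Rul':  {'background': 0, 'holding': 1, 'conclusion': 1},
-- }
--
-- # per source: category for rank 0, 1 and the default rank 2
-- CATS = {
--     'IRC':      ['definition', 'requirement', 'statute'],
--     'CFR':      ['example', 'table', 'regulation'],
--     'Rev_Proc': ['background', 'holding', 'guidance'],
--     'Rev_Rul':  ['background', 'holding', 'guidance'],
-- }
--
-- def classify_federal_content_type(text: str, source_type: str) -> str:
--     ranks = TERMS.get(source_type)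
--     if ranks is None:
--         return 'federal_document'
--     text_lower = text.lower()
--     best = min((r for term, r in ranks.items() if term in text_lower), default=2)
--     return CATS[source_type][best]
-- ===== Notes on version B (the rewrite author's own statement) =====
-- stated objective: alternative
-- what changed: Instead of A's ordered short-circuit if/elif branch tree, B eagerly collects the ranks of ALL trigger terms occurring in the text (term->rank map per source) and returns the category indexed by the minimum rank found (default rank if none), i.e. first-match branching is replaced by an argmin over term hits.
import Mathlib
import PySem

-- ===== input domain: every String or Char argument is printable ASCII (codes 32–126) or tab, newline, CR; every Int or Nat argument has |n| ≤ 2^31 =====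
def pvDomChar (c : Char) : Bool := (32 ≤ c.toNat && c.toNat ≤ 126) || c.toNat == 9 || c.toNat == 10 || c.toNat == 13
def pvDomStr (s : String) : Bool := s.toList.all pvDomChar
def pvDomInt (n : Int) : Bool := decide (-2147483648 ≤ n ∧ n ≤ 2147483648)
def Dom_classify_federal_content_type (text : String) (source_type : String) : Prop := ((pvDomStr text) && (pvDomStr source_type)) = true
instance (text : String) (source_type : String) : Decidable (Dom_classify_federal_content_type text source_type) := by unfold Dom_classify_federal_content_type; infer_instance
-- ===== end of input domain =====

-- B replaces A's ordered short-circuit branch tree by an argmin over all term hits (alternative decomposition; same behaviour).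

-- ===== PORT A =====
def classify_federal_content_type (text : String) (source_type : String) : String :=
  let text_lower := PySem.Str.lower text
  if source_type = "IRC" then
    if (["definition", "means", "includes"].any fun term => PySem.Str.isIn term text_lower) then
      "definition"
    else if PySem.Str.isIn "shall" text_lower || PySem.Str.isIn "must" text_lower then
      "requirement"
    else
      "statute"
  else if source_type = "CFR" then
    if PySem.Str.isIn "example" text_lower then
      "example"
    else if PySem.Str.isIn "table" text_lower || PySem.Str.isIn "schedule" text_lower then
      "table"
    else
      "regulation"
  else if source_type ∈ ["Rev_Proc", "Rev_Rul"] then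
    if PySem.Str.isIn "background" text_lower then
      "background"
    else if PySem.Str.isIn "holding" text_lower || PySem.Str.isIn "conclusion" text_lower then
      "holding"
    else
      "guidance"
  else
    "federal_document"

-- ===== PORT B =====
-- Source B's module-level TERMS dict: per source, term -> rank
def pvTerms : PySem.Dict String (PySem.Dict String Int) := PySem.Dict.mk
  [("IRC", PySem.Dict.mk [("definition", 0), ("means", 0), ("includes", 0), ("shall", 1), ("must", 1)]),
   ("CFR", PySem.Dict.mk [("example", 0), ("table", 1), ("schedule", 1)]),
   ("Rev_Proc", PySem.Dict.mk [("background", 0), ("holding", 1), ("conclusion", 1)]),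
   ("Rev_Rul", PySem.Dict.mk [("background", 0), ("holding", 1), ("conclusion", 1)])]

-- Source B's module-level CATS dict: per source, category for rank 0, 1 and default rank 2
def pvCats : PySem.Dict String (List String) := PySem.Dict.mk
  [("IRC", ["definition", "requirement", "statute"]),
   ("CFR", ["example", "table", "regulation"]),
   ("Rev_Proc", ["background", "holding", "guidance"]),
   ("Rev_Rul", ["background", "holding", "guidance"])]

-- min(<ranks of terms found in text_lower>, default=2)
def pvBestRank (text_lower : String) (ranks : PySem.Dict String Int) : Int :=
  match (PySem.Dict.items ranks).filterMap
        (fun p => if PySem.Str.isIn p.1 text_lower then some p.2 else none) with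
  | [] => 2
  | h :: rest => rest.foldl min h

def classify_federal_content_type_alt (text : String) (source_type : String) : String :=
  match PySem.Dict.get? pvTerms source_type with
  | none => "federal_document"
  | some ranks =>
    let text_lower := PySem.Str.lower text
    let best := pvBestRank text_lower ranks
    -- CATS[source_type][best]; the default is unreachable (best ∈ {0,1,2} and each CATS list has 3 entries)
    (PySem.List.pyGet? ((PySem.Dict.get? pvCats source_type).getD []) best).getD "federal_document"

-- ===== PRECONDITION & SPEC =====
def Spec_classify_federal_content_type (text : String) (source_type : String) (out : String) : Prop := out = classify_federal_content_type_alt text source_type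
instance (text : String) (source_type : String) (out : String) : Decidable (Spec_classify_federal_content_type text source_type out) := by unfold Spec_classify_federal_content_type; infer_instance

-- ===== CLAIM (what is proved, stated in full; the proofs are below) =====
def Claim_equal_classify_federal_content_type : Prop := ∀ (text : String) (source_type : String), Dom_classify_federal_content_type text source_type → Spec_classify_federal_content_type text source_type (classify_federal_content_type text source_type)

-- ===== LEMMAS AND PROOFS =====

-- ===== VERDICT (by name: the statement is the Claim_ definition above) =====
theorem classify_federal_content_type_spec : Claim_equal_classify_federal_content_type := by
  intro text source_type _
  unfold Spec_classify_federal_content_type classify_federal_content_type classify_federal_content_type_alt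
  by_cases h1 : source_type = "IRC"
  · subst h1
    simp only [pvTerms, pvCats, PySem.Dict.get?, pvBestRank]
    by_cases a1 : PySem.Chars.isIn ['d', 'e', 'f', 'i', 'n', 'i', 't', 'i', 'o', 'n'] (PySem.Chars.lower text.toList) = true <;>
    by_cases a2 : PySem.Chars.isIn ['m', 'e', 'a', 'n', 's'] (PySem.Chars.lower text.toList) = true <;>
    by_cases a3 : PySem.Chars.isIn ['i', 'n', 'c', 'l', 'u', 'd', 'e', 's'] (PySem.Chars.lower text.toList) = true <;>
    by_cases a4 : PySem.Chars.isIn ['s', 'h', 'a', 'l', 'l'] (PySem.Chars.lower text.toList) = true <;>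
    by_cases a5 : PySem.Chars.isIn ['m', 'u', 's', 't'] (PySem.Chars.lower text.toList) = true <;>
    simp [a1, a2, a3, a4, a5, PySem.List.pyGet?, PySem.List.pyIdx?]
  by_cases h2 : source_type = "CFR"
  · subst h2
    simp only [pvTerms, pvCats, PySem.Dict.get?, pvBestRank]
    by_cases a1 : PySem.Chars.isIn ['e', 'x', 'a', 'm', 'p', 'l', 'e'] (PySem.Chars.lower text.toList) = true <;>
    by_cases a2 : PySem.Chars.isIn ['t', 'a', 'b', 'l', 'e'] (PySem.Chars.lower text.toList) = true <;>
    by_cases a3 : PySem.Chars.isIn ['s', 'c', 'h', 'e', 'd', 'u', 'l', 'e'] (PySem.Chars.lower text.toList) = true <;>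
    simp [a1, a2, a3, PySem.List.pyGet?, PySem.List.pyIdx?]
  by_cases h3 : source_type = "Rev_Proc"
  · subst h3
    simp only [pvTerms, pvCats, PySem.Dict.get?, pvBestRank]
    by_cases a1 : PySem.Chars.isIn ['b', 'a', 'c', 'k', 'g', 'r', 'o', 'u', 'n', 'd'] (PySem.Chars.lower text.toList) = true <;>
    by_cases a2 : PySem.Chars.isIn ['h', 'o', 'l', 'd', 'i', 'n', 'g'] (PySem.Chars.lower text.toList) = true <;>
    by_cases a3 : PySem.Chars.isIn ['c', 'o', 'n', 'c', 'l', 'u', 's', 'i', 'o', 'n'] (PySem.Chars.lower text.toList) = true <;>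
    simp [a1, a2, a3, PySem.List.pyGet?, PySem.List.pyIdx?]
  by_cases h4 : source_type = "Rev_Rul"
  · subst h4
    simp only [pvTerms, pvCats, PySem.Dict.get?, pvBestRank]
    by_cases a1 : PySem.Chars.isIn ['b', 'a', 'c', 'k', 'g', 'r', 'o', 'u', 'n', 'd'] (PySem.Chars.lower text.toList) = true <;>
    by_cases a2 : PySem.Chars.isIn ['h', 'o', 'l', 'd', 'i', 'n', 'g'] (PySem.Chars.lower text.toList) = true <;>
    by_cases a3 : PySem.Chars.isIn ['c', 'o', 'n', 'c', 'l', 'u', 's', 'i', 'o', 'n'] (PySem.Chars.lower text.toList) = true <;>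
    simp [a1, a2, a3, PySem.List.pyGet?, PySem.List.pyIdx?]
  · have e1 : ("IRC" == source_type) = false := by simp; exact fun h => h1 h.symm
    have e2 : ("CFR" == source_type) = false := by simp; exact fun h => h2 h.symm
    have e3 : ("Rev_Proc" == source_type) = false := by simp; exact fun h => h3 h.symm
    have e4 : ("Rev_Rul" == source_type) = false := by simp; exact fun h => h4 h.symm
    simp [pvTerms, PySem.Dict.get?, List.find?, e1, e2, e3, e4, h1, h2, h3, h4]
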